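-- pv_equiv track=rewrite | github.com/Puwa1/Hex_decoder | gui.py | chk_hex_to_ascii
-- ===== SOURCE A (Python) =====
-- def chk_hex_to_ascii(hex_string):
--     try:
--         bytes_object = bytes.fromhex(hex_string)
--         result = ""
--         for b in bytes_object:
--             if 32 <= b <= 126: result += chr(b)
--             else: result += "."
--         return result
--     except ValueError: return ""
-- ===== SOURCE B (Python) =====
-- _HEX = "0123456789abcdef"
--
-- def chk_hex_to_ascii(hex_string):
--     n = len(hex_string)
--     out = []
--     i = 0
--     while i < n:
--         c = hex_string[i]
--         if c in " \t\n\x0b\x0c\r":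
--             i += 1
--             continue
--         hi = _HEX.find(c.lower())
--         lo = _HEX.find(hex_string[i + 1].lower()) if i + 1 < n else -1
--         if hi < 0 or lo < 0:
--             return ""
--         b = 16 * hi + lo
--         out.append(chr(b) if 32 <= b <= 126 else ".")
--         i += 2
--     return "".join(out)
-- ===== Notes on version B (the rewrite author's own statement) =====
-- stated objective: alternative
-- what changed: B never calls bytes.fromhex or builds a bytes object: a single fused index loop skips whitespace, looks each digit pair up in a hex-digit string, validates explicitly (no try/except) and emits the output character immediately into a list joined at the end.
import Mathlib
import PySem

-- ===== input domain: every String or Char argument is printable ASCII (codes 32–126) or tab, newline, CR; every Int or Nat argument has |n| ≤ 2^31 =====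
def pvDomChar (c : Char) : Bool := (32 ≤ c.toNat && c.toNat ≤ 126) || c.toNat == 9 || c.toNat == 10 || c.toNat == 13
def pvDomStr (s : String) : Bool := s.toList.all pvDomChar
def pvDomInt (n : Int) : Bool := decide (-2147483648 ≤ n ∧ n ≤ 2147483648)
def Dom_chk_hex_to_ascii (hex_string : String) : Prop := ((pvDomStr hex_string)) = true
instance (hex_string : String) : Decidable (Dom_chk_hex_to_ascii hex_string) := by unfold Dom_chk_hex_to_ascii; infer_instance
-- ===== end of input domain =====

-- B avoids the bytes object entirely: one fused pass parses each hex-digit pair (via a find into a hex-digit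
-- string) and emits the output character directly, validating explicitly instead of try/except (alternative).
-- A calls bytes.fromhex; PySem has no fromhex, so it is ported by hand (exact on ASCII input: ASCII whitespace
-- may separate byte pairs, each byte needs exactly two adjacent hex digits, none = ValueError).

-- the ASCII whitespace characters fromhex skips / B's " \t\n\x0b\x0c\r"
def pvWs : List Char := [' ', '\t', '\n', Char.ofNat 11, Char.ofNat 12, '\r']

-- hex digit value of a char, none if not a hex digit (exact: 0-9, a-f, A-F)
def pvHexDigit? (c : Char) : Option Nat :=
  if 48 ≤ c.toNat ∧ c.toNat ≤ 57 then some (c.toNat - 48)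
  else if 97 ≤ c.toNat ∧ c.toNat ≤ 102 then some (c.toNat - 87)
  else if 65 ≤ c.toNat ∧ c.toNat ≤ 70 then some (c.toNat - 55)
  else none

-- ===== PORT A =====
-- bytes.fromhex, exact on ASCII input
def pvFromhex? : List Char → Option (List Nat)
  | [] => some []
  | c :: rest =>
    if c ∈ pvWs then
      pvFromhex? rest
    else
      match pvHexDigit? c, rest with
      | some h, d :: rest' =>
        match pvHexDigit? d, pvFromhex? rest' with
        | some l, some bs => some ((16 * h + l) :: bs)
        | _, _ => none
      | _, _ => none

def chk_hex_to_ascii (hex_string : String) : String :=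
  match pvFromhex? hex_string.toList with
  | none => ""   -- except ValueError: return ""
  | some bytes_object =>
    -- result = ""; for b in bytes_object: result += chr(b) if printable else "."
    String.ofList (bytes_object.foldl
      (fun result b => result ++ [if 32 ≤ b ∧ b ≤ 126 then Char.ofNat b else '.']) [])

-- ===== PORT B =====
-- _HEX = "0123456789abcdef";  hi = _HEX.find(c.lower())
def pvHexFind (c : Char) : Int :=
  PySem.Str.find "0123456789abcdef" (PySem.Str.lower (String.ofList [c]))

-- the while loop over the index i, as structural recursion on the remaining characters
def pvGoB : List Char → List Char → String
  | [], out => String.ofList out            -- return "".join(out)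
  | c :: rest, out =>
    if c ∈ pvWs then pvGoB rest out         -- i += 1; continue
    else
      let hi := pvHexFind c
      let lo := match rest with | d :: _ => pvHexFind d | [] => (-1 : Int)
      if hi < 0 ∨ lo < 0 then ""            -- return ""
      else
        let b := 16 * hi + lo
        pvGoB rest.tail (out ++ [if 32 ≤ b ∧ b ≤ 126 then Char.ofNat b.toNat else '.'])  -- i += 2
termination_by cs _ => cs.length
decreasing_by all_goals simp [List.length_tail]

def chk_hex_to_ascii_alt (hex_string : String) : String :=
  pvGoB hex_string.toList []

-- ===== PRECONDITION & SPEC =====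
def Spec_chk_hex_to_ascii (hex_string : String) (out : String) : Prop := out = chk_hex_to_ascii_alt hex_string
instance (hex_string : String) (out : String) : Decidable (Spec_chk_hex_to_ascii hex_string out) := by unfold Spec_chk_hex_to_ascii; infer_instance

-- ===== CLAIM =====
def Claim_equal_chk_hex_to_ascii : Prop := ∀ (hex_string : String), Dom_chk_hex_to_ascii hex_string → Spec_chk_hex_to_ascii hex_string (chk_hex_to_ascii hex_string)

-- ===== LEMMAS AND PROOFS =====

-- A's accumulator loop is a map
theorem pv_foldl_append_map {α β : Type} (f : α → β) (xs : List α) (acc : List β) :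
    xs.foldl (fun r b => r ++ [f b]) acc = acc ++ xs.map f := by
  induction xs generalizing acc with
  | nil => simp
  | cons x xs ih => simp [List.foldl, ih]

-- B's find into the hex-digit string agrees with pvHexDigit? on every ASCII char
set_option maxRecDepth 4000 in
theorem pv_find_eq_digit (c : Char) (h : c.toNat < 128) :
    pvHexFind c = ((pvHexDigit? c).map (Int.ofNat)).getD (-1) := by
  have key : ∀ n : Fin 128, pvHexFind (Char.ofNat n.val) =
      ((pvHexDigit? (Char.ofNat n.val)).map (Int.ofNat)).getD (-1) := by decide
  have := key ⟨c.toNat, h⟩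
  simpa [Char.ofNat_toNat] using this

-- a hex digit value is < 16
theorem pv_hexDigit_lt (c : Char) (v : Nat) (h : pvHexDigit? c = some v) : v < 16 := by
  unfold pvHexDigit? at h
  split_ifs at h with h1 h2 h3 <;> simp_all <;> omega

-- pvHexFind on a hex digit / non-digit (ASCII chars)
theorem pv_find_some (c : Char) (h : c.toNat < 128) (v : Nat) (hv : pvHexDigit? c = some v) :
    pvHexFind c = (v : Int) := by
  rw [pv_find_eq_digit c h, hv]; rfl

theorem pv_find_none (c : Char) (h : c.toNat < 128) (hv : pvHexDigit? c = none) :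
    pvHexFind c = -1 := by
  rw [pv_find_eq_digit c h, hv]; rfl

-- the fused B loop computes exactly "decode with fromhex, then map" (and "" where fromhex raises)
theorem pv_goB_eq (cs : List Char) : (∀ c ∈ cs, c.toNat < 128) → ∀ out : List Char,
    pvGoB cs out = (match pvFromhex? cs with
      | none => ""
      | some bs => String.ofList (out ++ bs.map
          (fun b => if 32 ≤ b ∧ b ≤ 126 then Char.ofNat b else '.'))) := by
  induction cs using pvFromhex?.induct with
  | case1 =>
    intro _ out
    simp [pvGoB, pvFromhex?]
  | case2 c rest hw ih =>
    intro h128 out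
    rw [pvGoB.eq_def, pvFromhex?.eq_def]
    simp only [if_pos hw]
    exact ih (fun x hx => h128 x (List.mem_cons_of_mem _ hx)) out
  | case3 c hw h d rest' hc l bs hr hd ih =>
    intro h128 out
    have hcn : c.toNat < 128 := h128 c (by simp)
    have hdn : d.toNat < 128 := h128 d (by simp)
    have hl16 := pv_hexDigit_lt d l hd
    have hh16 := pv_hexDigit_lt c h hc
    rw [pvGoB.eq_def, pvFromhex?.eq_def]
    simp only [if_neg hw, hc, hd, hr, pv_find_some c hcn h hc, pv_find_some d hdn l hd,
      List.tail_cons]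
    have hge : ¬((h : Int) < 0 ∨ (l : Int) < 0) := by omega
    rw [if_neg hge]
    have hb : (16 * (h : Int) + (l : Int)) = ((16 * h + l : Nat) : Int) := by push_cast; ring
    have hcond : (32 ≤ 16 * (h : Int) + (l : Int) ∧ 16 * (h : Int) + (l : Int) ≤ 126)
        ↔ (32 ≤ 16 * h + l ∧ 16 * h + l ≤ 126) := by omega
    have htn : (16 * (h : Int) + (l : Int)).toNat = 16 * h + l := by omega
    rw [ih (fun x hx => h128 x (by simp [hx])) _]
    have : (if 32 ≤ 16 * (h : Int) + (l : Int) ∧ 16 * (h : Int) + (l : Int) ≤ 126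
          then Char.ofNat (16 * (h : Int) + (l : Int)).toNat else '.')
        = (if 32 ≤ 16 * h + l ∧ 16 * h + l ≤ 126 then Char.ofNat (16 * h + l) else '.') := by
      rw [htn]
      by_cases hx : 32 ≤ 16 * h + l ∧ 16 * h + l ≤ 126
      · rw [if_pos (hcond.mpr hx), if_pos hx]
      · rw [if_neg (fun hy => hx (hcond.mp hy)), if_neg hx]
    rw [this, hr]
    simp
  | case4 c hw h d rest' hc hfail ih =>
    intro h128 out
    have hcn : c.toNat < 128 := h128 c (by simp)
    have hdn : d.toNat < 128 := h128 d (by simp)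
    have hh16 := pv_hexDigit_lt c h hc
    rw [pvGoB.eq_def, pvFromhex?.eq_def]
    simp only [if_neg hw, hc, pv_find_some c hcn h hc, List.tail_cons]
    rcases hd : pvHexDigit? d with _ | l
    · -- second char is not a hex digit: lo = -1, B returns "" directly
      rw [pv_find_none d hdn hd]
      rw [if_pos (by omega : ((h : Int) < 0 ∨ (-1 : Int) < 0))]
    · -- digits fine but the tail fails: B recurses and the tail yields ""
      have hl16 := pv_hexDigit_lt d l hd
      have hr : pvFromhex? rest' = none := by
        rcases hx : pvFromhex? rest' with _ | bs
        · rfl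
        · exact absurd (hfail l bs hd hx) (by simp)
      rw [pv_find_some d hdn l hd]
      rw [if_neg (by omega : ¬((h : Int) < 0 ∨ (l : Int) < 0))]
      rw [ih (fun x hx => h128 x (by simp [hx])) _, hr]
  | case5 c rest hw hfail =>
    intro h128 out
    have hcn : c.toNat < 128 := h128 c (by simp)
    rw [pvGoB.eq_def, pvFromhex?.eq_def]
    simp only [if_neg hw]
    rcases hc : pvHexDigit? c with _ | h
    · -- first char is not a hex digit
      rw [pv_find_none c hcn hc]
      rw [if_pos (Or.inl (by norm_num : (-1 : Int) < 0))]
    · -- a digit, so the rest must be empty (else case3/case4 applied)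
      cases rest with
      | nil =>
        rw [pv_find_some c hcn h hc]
        rw [if_pos (by omega : ((h : Int) < 0 ∨ (-1 : Int) < 0))]
      | cons d rest' => exact absurd (hfail h d rest' hc rfl) (by simp)

-- ===== VERDICT =====
theorem chk_hex_to_ascii_spec : Claim_equal_chk_hex_to_ascii := by
  intro s hdom
  unfold Spec_chk_hex_to_ascii chk_hex_to_ascii chk_hex_to_ascii_alt
  have h128 : ∀ c ∈ s.toList, c.toNat < 128 := by
    intro c hc
    have := List.all_eq_true.mp hdom c hc
    simp only [pvDomChar, Bool.or_eq_true, Bool.and_eq_true, decide_eq_true_eq,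
      beq_iff_eq] at this
    omega
  rw [pv_goB_eq s.toList h128 []]
  match h : pvFromhex? s.toList with
  | none => rfl
  | some bs => simp only [pv_foldl_append_map, List.nil_append]
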